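-- pv_equiv track=rewrite | github.com/IshaanKalra2103/benchmark_cli | cli/checkpoints.py | build_checkpoint_schedule
-- ===== SOURCE A (Python) =====
-- def build_checkpoint_schedule(
--     available_steps: list[int],
--     include_first: bool,
--     anchor_step: int,
--     interval: int,
-- ) -> list[int]:
--     if not available_steps:
--         return []
--
--     selected: set[int] = set()
--     if include_first:
--         selected.add(available_steps[0])
--
--     if anchor_step in available_steps:
--         selected.add(anchor_step)
--
--     latest = available_steps[-1]
--     if interval > 0:
--         step = anchor_step
--         while step <= latest:
--             if step in available_steps:
--                 selected.add(step)
--             step += interval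
--
--     return sorted(selected)
-- ===== SOURCE B (Python) =====
-- def build_checkpoint_schedule(
--     available_steps: list[int],
--     include_first: bool,
--     anchor_step: int,
--     interval: int,
-- ) -> list[int]:
--     if not available_steps:
--         return []
--
--     selected: set[int] = set()
--     if include_first:
--         selected.add(available_steps[0])
--
--     if anchor_step in available_steps:
--         selected.add(anchor_step)
--
--     if interval > 0:
--         latest = available_steps[-1]
--         selected.update(
--             s for s in available_steps
--             if anchor_step <= s <= latest and (s - anchor_step) % interval == 0
--         )
--
--     return sorted(selected)
-- ===== Notes on version B (the rewrite author's own statement) =====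
-- stated objective: alternative
-- what changed: Replaced the while-loop that steps from anchor_step up to the last element (testing list membership at each step) by a single filter over available_steps testing anchor_step <= s <= latest and (s - anchor_step) % interval == 0.
import Mathlib
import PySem

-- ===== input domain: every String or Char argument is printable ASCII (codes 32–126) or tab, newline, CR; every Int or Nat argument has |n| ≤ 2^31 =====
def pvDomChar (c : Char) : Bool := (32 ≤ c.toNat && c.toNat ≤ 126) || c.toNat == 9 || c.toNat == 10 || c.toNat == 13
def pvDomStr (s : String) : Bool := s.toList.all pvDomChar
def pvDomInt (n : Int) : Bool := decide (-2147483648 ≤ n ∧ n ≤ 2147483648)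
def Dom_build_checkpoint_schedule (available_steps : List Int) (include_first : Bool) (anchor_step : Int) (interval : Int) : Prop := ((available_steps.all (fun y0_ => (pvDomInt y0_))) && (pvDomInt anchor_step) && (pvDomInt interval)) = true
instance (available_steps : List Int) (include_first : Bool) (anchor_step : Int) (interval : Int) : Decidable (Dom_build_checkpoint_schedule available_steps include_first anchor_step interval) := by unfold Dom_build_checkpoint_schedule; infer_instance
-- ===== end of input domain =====

-- B replaces A's while-loop over the arithmetic progression anchor, anchor+interval, …
-- (a list-membership test per step) by one filter pass over available_steps; objective: alternative.

-- ===== PORT A =====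
-- A's 'while step <= latest' loop; the '0 < interval' conjunct in the guard only makes the
-- recursion total (A enters the loop only under 'if interval > 0')
def pvLoopA (avail : List Int) (latest interval step : Int) (sel : PySem.Set Int) : PySem.Set Int :=
  if _h : step ≤ latest ∧ 0 < interval then
    pvLoopA avail latest interval (step + interval)
      (if avail.contains step then PySem.Set.add sel step else sel)
  else sel
termination_by (latest + interval - step).toNat
decreasing_by omega

def build_checkpoint_schedule (available_steps : List Int) (include_first : Bool) (anchor_step : Int) (interval : Int) : List Int :=
  if available_steps = [] then []
  else
    let selected : PySem.Set Int := PySem.Set.empty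
    let selected := if include_first then PySem.Set.add selected (PySem.List.pyGetD available_steps 0 0) else selected
    let selected := if available_steps.contains anchor_step then PySem.Set.add selected anchor_step else selected
    let latest := PySem.List.pyGetD available_steps (-1) 0
    let selected := if 0 < interval then pvLoopA available_steps latest interval anchor_step selected else selected
    PySem.List.sorted selected (fun x => x) false

-- ===== PORT B =====
def build_checkpoint_schedule_alt (available_steps : List Int) (include_first : Bool) (anchor_step : Int) (interval : Int) : List Int :=
  if available_steps = [] then []
  else
    let selected : PySem.Set Int := PySem.Set.empty
    let selected := if include_first then PySem.Set.add selected (PySem.List.pyGetD available_steps 0 0) else selected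
    let selected := if available_steps.contains anchor_step then PySem.Set.add selected anchor_step else selected
    let selected :=
      if 0 < interval then
        let latest := PySem.List.pyGetD available_steps (-1) 0
        PySem.Set.update selected (available_steps.filter (fun s =>
          decide (anchor_step ≤ s) && decide (s ≤ latest) && decide (PySem.Int.mod (s - anchor_step) interval = 0)))
      else selected
    PySem.List.sorted selected (fun x => x) false

-- ===== PRECONDITION & SPEC =====
def Spec_build_checkpoint_schedule (available_steps : List Int) (include_first : Bool) (anchor_step : Int) (interval : Int) (out : List Int) : Prop := out = build_checkpoint_schedule_alt available_steps include_first anchor_step interval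
instance (available_steps : List Int) (include_first : Bool) (anchor_step : Int) (interval : Int) (out : List Int) : Decidable (Spec_build_checkpoint_schedule available_steps include_first anchor_step interval out) := by unfold Spec_build_checkpoint_schedule; infer_instance

-- ===== CLAIM (what is proved, stated in full; the proofs are below) =====
def Claim_equal_build_checkpoint_schedule : Prop := ∀ (available_steps : List Int) (include_first : Bool) (anchor_step : Int) (interval : Int), Dom_build_checkpoint_schedule available_steps include_first anchor_step interval → Spec_build_checkpoint_schedule available_steps include_first anchor_step interval (build_checkpoint_schedule available_steps include_first anchor_step interval)

-- ===== LEMMAS AND PROOFS =====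

-- membership in the result of A's while-loop
set_option maxHeartbeats 1000000 in
theorem mem_pvLoopA (avail : List Int) (latest interval : Int) :
    ∀ (step : Int) (sel : PySem.Set Int) (x : Int),
      x ∈ pvLoopA avail latest interval step sel ↔
        x ∈ sel ∨ (0 < interval ∧ step ≤ x ∧ x ≤ latest ∧ interval ∣ (x - step) ∧ x ∈ avail) := by
  intro step sel x
  induction step, sel using pvLoopA.induct avail latest interval with
  | case1 step sel h ih =>
    rw [pvLoopA, dif_pos h]
    rw [dite_eq_ite] at ih
    rw [ih]
    have hsel' : x ∈ (if avail.contains step then PySem.Set.add sel step else sel) ↔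
        x ∈ sel ∨ (step ∈ avail ∧ x = step) := by
      by_cases hc : step ∈ avail
      · simp [List.contains_iff_mem.mpr hc, PySem.Set.mem_add, hc]
      · simp [hc, List.contains_iff_mem]
    have harith :
        (0 < interval ∧ step ≤ x ∧ x ≤ latest ∧ interval ∣ (x - step) ∧ x ∈ avail) ↔
        ((step ∈ avail ∧ x = step) ∨
          (0 < interval ∧ step + interval ≤ x ∧ x ≤ latest ∧ interval ∣ (x - (step + interval)) ∧ x ∈ avail)) := by
      constructor
      · rintro ⟨hi, hsx, hxl, ⟨k, hk⟩, hx⟩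
        have hk0 : 0 ≤ k := by nlinarith
        rcases eq_or_lt_of_le hk0 with hk0 | hk0
        · left
          have hx0 : x = step := by rw [← hk0, mul_zero] at hk; omega
          exact ⟨hx0 ▸ hx, hx0⟩
        · right
          have hk1 : (1:Int) ≤ k := hk0
          have hmul : interval * 1 ≤ interval * k := mul_le_mul_of_nonneg_left hk1 (le_of_lt hi)
          refine ⟨hi, by linarith [hk, hmul], hxl, ⟨k - 1, by rw [mul_sub, mul_one, ← hk]; ring⟩, hx⟩
      · rintro (⟨hx, rfl⟩ | ⟨hi, hsx, hxl, ⟨k, hk⟩, hx⟩)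
        · exact ⟨h.2, le_refl _, h.1, ⟨0, by ring⟩, hx⟩
        · have hk0 : 0 ≤ k := by nlinarith
          have hmul : interval * 0 ≤ interval * k := mul_le_mul_of_nonneg_left hk0 (le_of_lt hi)
          exact ⟨hi, by linarith [hk, hmul], hxl, ⟨k + 1, by rw [mul_add, mul_one, ← hk]; ring⟩, hx⟩
    rw [hsel', harith]
    tauto
  | case2 step sel h =>
    rw [pvLoopA, dif_neg h]
    constructor
    · exact Or.inl
    · rintro (hm | ⟨hi, hsx, hxl, _, _⟩)
      · exact hm
      · exact absurd ⟨by omega, hi⟩ h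

-- A's loop preserves distinctness of the selected set
theorem nodup_pvLoopA (avail : List Int) (latest interval : Int) :
    ∀ (step : Int) (sel : PySem.Set Int), sel.Nodup →
      (pvLoopA avail latest interval step sel).Nodup := by
  intro step sel hnd
  induction step, sel using pvLoopA.induct avail latest interval with
  | case1 step sel h ih =>
    rw [pvLoopA, dif_pos h]
    apply ih
    by_cases hc : step ∈ avail
    · simp only [List.contains_iff_mem, hc, if_true]; exact PySem.Set.nodup_add sel step hnd
    · simp only [List.contains_iff_mem, hc, if_false]; exact hnd
  | case2 step sel h =>
    rw [pvLoopA, dif_neg h]; exact hnd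

theorem build_checkpoint_schedule_spec' :
    ∀ (available_steps : List Int) (include_first : Bool) (anchor_step : Int) (interval : Int),
      build_checkpoint_schedule available_steps include_first anchor_step interval
        = build_checkpoint_schedule_alt available_steps include_first anchor_step interval := by
  intro avail inc anchor interval
  unfold build_checkpoint_schedule build_checkpoint_schedule_alt
  by_cases hnil : avail = []
  · simp [hnil]
  · simp only [hnil, if_false]
    set base : PySem.Set Int :=
      (if avail.contains anchor then
        PySem.Set.add (if inc then PySem.Set.add PySem.Set.empty (PySem.List.pyGetD avail 0 0) else PySem.Set.empty) anchor
      else (if inc then PySem.Set.add PySem.Set.empty (PySem.List.pyGetD avail 0 0) else PySem.Set.empty)) with hbase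
    have hbnd : base.Nodup := by
      rw [hbase]
      have h0 : (if inc then PySem.Set.add PySem.Set.empty (PySem.List.pyGetD avail 0 0) else PySem.Set.empty).Nodup := by
        by_cases h : inc
        · simpa [h] using PySem.Set.nodup_add PySem.Set.empty (PySem.List.pyGetD avail 0 0) List.nodup_nil
        · simp [h, PySem.Set.empty]
      by_cases h : anchor ∈ avail
      · simp only [List.contains_iff_mem, h, if_true]; exact PySem.Set.nodup_add _ anchor h0
      · simp only [List.contains_iff_mem, h, if_false]; exact h0
    by_cases hint : 0 < interval
    · simp only [hint, if_true]
      set latest := PySem.List.pyGetD avail (-1) 0 with hlatest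
      apply (PySem.List.sorted_id_eq_sorted_id_iff_perm _ _).mpr
      have hndA : (pvLoopA avail latest interval anchor base).Nodup :=
        nodup_pvLoopA avail latest interval anchor base hbnd
      have hndB : (PySem.Set.update base (avail.filter (fun s =>
          decide (anchor ≤ s) && decide (s ≤ latest) && decide (PySem.Int.mod (s - anchor) interval = 0)))).Nodup :=
        PySem.Set.nodup_update _ _ hbnd
      rw [List.perm_ext_iff_of_nodup hndA hndB]
      intro x
      rw [mem_pvLoopA, PySem.Set.mem_update, List.mem_filter]
      have hmod : (decide (anchor ≤ x) && decide (x ≤ latest) && decide (PySem.Int.mod (x - anchor) interval = 0)) = true ↔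
          (anchor ≤ x ∧ x ≤ latest ∧ interval ∣ (x - anchor)) := by
        simp [PySem.Int.mod_eq_zero_iff_dvd, and_assoc]
      constructor
      · rintro (hb | ⟨_, h1, h2, h3, h4⟩)
        · exact Or.inl hb
        · exact Or.inr ⟨h4, hmod.mpr ⟨h1, h2, h3⟩⟩
      · rintro (hb | ⟨hx, hcond⟩)
        · exact Or.inl hb
        · obtain ⟨h1, h2, h3⟩ := hmod.mp hcond
          exact Or.inr ⟨hint, h1, h2, h3, hx⟩
    · simp [hint]

-- ===== VERDICT (by name: the statement is the Claim_ definition above) =====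
theorem build_checkpoint_schedule_spec : Claim_equal_build_checkpoint_schedule := by
  intro avail inc anchor interval _
  unfold Spec_build_checkpoint_schedule
  exact build_checkpoint_schedule_spec' avail inc anchor interval
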